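/- GENERATED by farm/mkstatement.py from design/units.tsv (unit `codebook_decode_deinterleave_repeat.2b`) and the assertions of Vorbis/Spec/Codebook/Deint2.lean — do not edit.
   THE STATEMENT of the proof unit `codebook_decode_deinterleave_repeat.2b`: segment 2b of `codebook_decode_deinterleave_repeat` (40 instructions; entries 0x10de32;
   exits 0x10dc5c,0x10decf; ranges 0x10dc4d-0x10dc52 + 0x10dcad-0x10dcbd + 0x10de32-0x10dec9)
   takes each of its entry assertions to one of its exit assertions (`Vorbis.Spec.Deint.Claim2b`), given the contracts of its callees.
   What the names mean: Vorbis/Spec/Basic.lean (the shared hypotheses), Vorbis/Spec/Codebook/Deint2.lean (the assertions). The theorem to prove: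
   `theorem codebook_decode_deinterleave_repeat_2b_ok : Vorbis.Spec.codebook_decode_deinterleave_repeat_2b.Statement`. -/
import Vorbis.Spec.Codebook
import Vorbis.Spec.Codebook.Deint2
namespace Vorbis.Spec.codebook_decode_deinterleave_repeat_2b
open X86 X86.User Asan

/-- The statement of unit `codebook_decode_deinterleave_repeat.2b`. -/
def Statement : Prop :=
  ∀ (Lay : Layout) (_hLay : Lay.hi = 0x1000000) (μ : Microarch) (_hμ : UserX.MicroOK μ) (u₀ : State)
    (_hcode : HasCodeNat Lay u₀ Vorbis.L.codebook_decode_deinterleave_repeat.entry Vorbis.Code.code_codebook_decode_deinterleave_repeat.nat Vorbis.L.codebook_decode_deinterleave_repeat.size)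
    (_h_asan_load1_noabort : Asan.SmallCheck Lay μ Vorbis.WayInv (Vorbis.CodeOK u₀) [.rax, .rdx] 1 Vorbis.L.__asan_load1_noabort.entry)
    (_h_asan_load4_noabort : Asan.SmallCheck Lay μ Vorbis.WayInv (Vorbis.CodeOK u₀) [.rax, .rcx, .rdx] 4 Vorbis.L.__asan_load4_noabort.entry)
    (_h_codebook_decode_scalar_raw : ∀ (others : List Obj) (frames : List (Nat × FrameLayout)) (Blk : Block → Prop) (len : Nat), Calls Lay μ Vorbis.WayInv (Vorbis.conv u₀) Vorbis.L.codebook_decode_scalar_raw.entry (Vorbis.Spec.codebook_decode_scalar_raw.spec others frames Blk len))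
    (_h_asan_load2_noabort : Asan.SmallCheck Lay μ Vorbis.WayInv (Vorbis.CodeOK u₀) [.rax, .rcx, .rdx] 2 Vorbis.L.__asan_load2_noabort.entry)
    (_h_asan_load8_noabort : Asan.SmallCheck Lay μ Vorbis.WayInv (Vorbis.CodeOK u₀) [.rax, .rcx, .rdx] 8 Vorbis.L.__asan_load8_noabort.entry),
    Vorbis.Spec.Deint.Claim2b Lay μ u₀

end Vorbis.Spec.codebook_decode_deinterleave_repeat_2b
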